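-- pv_equiv track=rewrite | github.com/Kcarter787/WikiParser | crawler_objects.py | _has_open_parenthesis
-- ===== SOURCE A (Python) =====
-- def _has_open_parenthesis(string):
--     """
--     Returns true if the string encapsulates its right side--
--     regardless of validity, i.e) "((()"-> True
--     """
--     parenthesis_count = 0
--     reversed_string = reversed(string)
--     for char in reversed_string:
--         if char == "(":
--             parenthesis_count += 1
--         elif char == ")":
--             parenthesis_count -= 1
--         if parenthesis_count >= 1:
--             return True
--     return False
-- ===== SOURCE B (Python) =====
-- def _has_open_parenthesis(string):
--     open_count = 0
--     for char in string:
--         if char == "(":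
--             open_count += 1
--         elif char == ")" and open_count > 0:
--             open_count -= 1
--     return open_count > 0
-- ===== Notes on version B (the rewrite author's own statement) =====
-- stated objective: idiomatic
-- what changed: Replaces A's right-to-left scan over reversed(string) with a signed balance and early exit by a single forward loop maintaining a clamped-at-zero count of currently-unmatched open parentheses, returning count > 0 at the end.
import Mathlib
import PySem

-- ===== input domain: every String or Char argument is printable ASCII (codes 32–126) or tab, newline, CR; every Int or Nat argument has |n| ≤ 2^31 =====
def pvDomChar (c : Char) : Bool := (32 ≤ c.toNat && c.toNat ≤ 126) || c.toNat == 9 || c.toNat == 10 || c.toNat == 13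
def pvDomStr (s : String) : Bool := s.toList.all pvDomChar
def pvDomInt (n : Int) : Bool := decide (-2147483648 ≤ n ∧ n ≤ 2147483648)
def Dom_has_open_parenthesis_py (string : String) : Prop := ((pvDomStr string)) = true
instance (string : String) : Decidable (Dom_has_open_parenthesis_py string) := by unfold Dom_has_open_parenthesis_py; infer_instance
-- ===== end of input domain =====

-- B replaces A's right-to-left signed-balance scan (with early exit) by a forward loop
-- over the string with a clamped-at-zero counter of unmatched open parentheses (idiomatic).

-- ===== PORT A =====
-- A's for-loop over reversed(string): threads parenthesis_count, early-returns on count >= 1.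
def pvALoop (cnt : Int) : List Char → Bool
  | [] => false
  | c :: rest =>
    let cnt' := if c = '(' then cnt + 1 else if c = ')' then cnt - 1 else cnt
    if 1 ≤ cnt' then true else pvALoop cnt' rest

def has_open_parenthesis_py (string : String) : Bool :=
  pvALoop 0 string.toList.reverse

-- ===== PORT B =====
-- B's forward loop: clamp-at-zero counter of unmatched '('.
def pvBStep (cnt : Int) (c : Char) : Int :=
  if c = '(' then cnt + 1
  else if c = ')' then (if 0 < cnt then cnt - 1 else cnt)
  else cnt

def has_open_parenthesis_py_alt (string : String) : Bool :=
  decide (0 < string.toList.foldl pvBStep 0)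

-- ===== PRECONDITION & SPEC =====
def Spec_has_open_parenthesis_py (string : String) (out : Bool) : Prop := out = has_open_parenthesis_py_alt string
instance (string : String) (out : Bool) : Decidable (Spec_has_open_parenthesis_py string out) := by unfold Spec_has_open_parenthesis_py; infer_instance

-- ===== CLAIM (what is proved, stated in full; the proofs are below) =====
def Claim_equal_has_open_parenthesis_py : Prop := ∀ (string : String), Dom_has_open_parenthesis_py string → Spec_has_open_parenthesis_py string (has_open_parenthesis_py string)

-- ===== LEMMAS AND PROOFS =====

-- contribution of one character to the paren balance
def pvD (c : Char) : Int := if c = '(' then 1 else if c = ')' then -1 else 0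

-- signed paren balance of a character list
def pvBal : List Char → Int
  | [] => 0
  | c :: l => pvD c + pvBal l

-- maximum balance over all suffixes (including the empty one)
def pvM : List Char → Int
  | [] => 0
  | c :: l => max (pvD c + pvBal l) (pvM l)

theorem pvM_nonneg (l : List Char) : 0 ≤ pvM l := by
  induction l with
  | nil => simp [pvM]
  | cons c l ih => simp [pvM]; right; exact ih

theorem pvBal_le_M (l : List Char) : pvBal l ≤ pvM l := by
  cases l with
  | nil => simp [pvBal, pvM]
  | cons c l => simp [pvBal, pvM]

theorem pvBal_append (xs ys : List Char) : pvBal (xs ++ ys) = pvBal xs + pvBal ys := by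
  induction xs with
  | nil => simp [pvBal]
  | cons c xs ih => simp [pvBal, ih]; ring

theorem pvBal_reverse (l : List Char) : pvBal l.reverse = pvBal l := by
  induction l with
  | nil => rfl
  | cons c l ih => simp [pvBal, pvBal_append, ih]; ring

theorem pvALoop_snoc (xs : List Char) (c : Char) (cnt : Int) :
    pvALoop cnt (xs ++ [c]) = (pvALoop cnt xs || decide (1 ≤ cnt + pvBal xs + pvD c)) := by
  induction xs generalizing cnt with
  | nil =>
    simp only [List.nil_append, pvALoop, pvBal, pvD, Bool.false_or]
    split_ifs <;> simp_all <;> omega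
  | cons x xs ih =>
    simp only [List.cons_append, pvALoop]
    have hstep : (if x = '(' then cnt + 1 else if x = ')' then cnt - 1 else cnt) = cnt + pvD x := by
      simp only [pvD]; split_ifs <;> omega
    rw [hstep]
    by_cases h1 : (1 : Int) ≤ cnt + pvD x
    · simp [h1]
    · rw [if_neg h1, if_neg h1, ih]
      have h3 : cnt + pvD x + pvBal xs + pvD c = cnt + pvBal (x :: xs) + pvD c := by
        simp [pvBal]; ring
      rw [h3]

theorem pvALoop_reverse (l : List Char) :
    pvALoop 0 l.reverse = decide (1 ≤ pvM l) := by
  induction l with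
  | nil => simp [pvALoop, pvM]
  | cons c l ih =>
    have hrev : (c :: l).reverse = l.reverse ++ [c] := by simp
    rw [hrev, pvALoop_snoc, ih, pvBal_reverse]
    rw [Bool.eq_iff_iff]
    simp only [Bool.or_eq_true, decide_eq_true_eq, pvM, le_max_iff]
    omega

theorem pvBStep_nonneg (cnt : Int) (c : Char) (h : 0 ≤ cnt) : 0 ≤ pvBStep cnt c := by
  simp only [pvBStep]; split_ifs <;> omega

theorem pvFoldB (l : List Char) (acc : Int) (h : 0 ≤ acc) :
    l.foldl pvBStep acc = max (acc + pvBal l) (pvM l) := by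
  induction l generalizing acc with
  | nil =>
    simp only [List.foldl_nil, pvBal, pvM]
    omega
  | cons c l ih =>
    have hble := pvBal_le_M l
    have hmn := pvM_nonneg l
    rw [List.foldl_cons, ih _ (pvBStep_nonneg acc c h)]
    simp only [pvBStep, pvBal, pvM, pvD, max_def]
    split_ifs <;> omega

theorem has_open_parenthesis_py_eq (s : String) :
    has_open_parenthesis_py s = has_open_parenthesis_py_alt s := by
  unfold has_open_parenthesis_py has_open_parenthesis_py_alt
  rw [pvALoop_reverse, pvFoldB s.toList 0 le_rfl]
  have h1 := pvBal_le_M s.toList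
  have h2 := pvM_nonneg s.toList
  rw [Bool.eq_iff_iff]
  simp only [decide_eq_true_eq]
  omega

-- ===== VERDICT (by name: the statement is the Claim_ definition above) =====
theorem has_open_parenthesis_py_spec : Claim_equal_has_open_parenthesis_py := by
  intro s _
  unfold Spec_has_open_parenthesis_py
  exact has_open_parenthesis_py_eq s
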